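-- pv_equiv track=rewrite | github.com/HenryWilliamson/ulohypva | uloha6.py | optimalizuj_seznam
-- ===== SOURCE A (Python) =====
-- def optimalizuj_seznam(seznam, regaly):
--   optimalizovany_seznam = []
--   pozice_v_regalu = 0
--
--   for polozka in seznam:
--     nalezeno = False
--     for cislo_regalu in range(pozice_v_regalu, len(regaly)):
--       if polozka in regaly[cislo_regalu]:
--         optimalizovany_seznam.append((polozka, cislo_regalu + 1, najdi_produkt(polozka, regaly[cislo_regalu])))
--         pozice_v_regalu = cislo_regalu + 1
--         nalezeno = True
--         break
--
--     if not nalezeno: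
--       optimalizovany_seznam.append((polozka, -1, "nenalezeno"))
--
--   return optimalizovany_seznam
--
-- def najdi_produkt(nazev, produkty):
--   for produkt in produkty:
--     if nazev in produkt.lower():
--       return produkt
--   return produkty[0]
-- ===== SOURCE B (Python) =====
-- def optimalizuj_seznam(seznam, regaly):
--     # Build once: item -> increasing list of shelf indices containing it.
--     index = {}
--     for i, regal in enumerate(regaly):
--         for nazev in regal:
--             sloty = index.setdefault(nazev, [])
--             if not sloty or sloty[-1] != i:
--                 sloty.append(i)
--
--     vysledek = []
--     pozice = 0
--     for polozka in seznam:
--         i = prvni_od(index.get(polozka, []), pozice)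
--         if i is None:
--             vysledek.append((polozka, -1, "nenalezeno"))
--         else:
--             vysledek.append((polozka, i + 1, najdi_produkt(polozka, regaly[i])))
--             pozice = i + 1
--     return vysledek
--
-- def prvni_od(sloty, lo):
--     # binary search: first shelf index >= lo in the increasing list sloty
--     a, b = 0, len(sloty)
--     while a < b:
--         m = (a + b) // 2
--         if sloty[m] < lo:
--             a = m + 1
--         else:
--             b = m
--     return sloty[a] if a < len(sloty) else None
--
-- def najdi_produkt(nazev, produkty):
--     for produkt in produkty:
--         if nazev in produkt.lower():
--             return produkt
--     return produkty[0]
-- ===== Notes on version B (the rewrite author's own statement) =====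
-- stated objective: alternative
-- what changed: B builds an item->increasing-shelf-index dictionary in one pass over the shelves and then binary-searches, per list item, the first recorded index >= the current pointer, instead of A's per-item rescans of the remaining shelves' contents.
import Mathlib
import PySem

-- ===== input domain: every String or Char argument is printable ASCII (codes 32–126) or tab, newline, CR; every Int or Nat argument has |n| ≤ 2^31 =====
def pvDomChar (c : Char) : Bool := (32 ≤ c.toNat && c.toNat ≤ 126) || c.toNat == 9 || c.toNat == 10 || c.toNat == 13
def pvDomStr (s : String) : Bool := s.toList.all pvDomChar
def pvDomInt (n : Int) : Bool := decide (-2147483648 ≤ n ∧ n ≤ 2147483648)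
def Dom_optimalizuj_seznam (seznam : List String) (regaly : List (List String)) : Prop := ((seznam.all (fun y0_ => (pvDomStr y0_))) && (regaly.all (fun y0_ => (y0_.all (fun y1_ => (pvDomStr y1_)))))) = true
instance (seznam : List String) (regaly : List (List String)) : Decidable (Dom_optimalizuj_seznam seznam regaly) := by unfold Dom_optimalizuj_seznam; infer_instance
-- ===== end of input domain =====

-- B replaces A's per-item rescans of the remaining shelves by a shelf-index dictionary
-- built once, then binary-searches the first recorded shelf index ≥ the current pointer
-- (objective: alternative).

-- ===== PORT A =====
-- najdi_produkt: first product whose lower() contains nazev, else produkty[0].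
-- Both programs only call it with a nonempty shelf, so 'produkty[0]' is ported as headD "".
def najdi_produkt (nazev : String) (produkty : List String) : String :=
  match produkty.find? (fun produkt => PySem.Str.isIn nazev (PySem.Str.lower produkt)) with
  | some produkt => produkt
  | none => produkty.headD ""

def optimalizuj_seznam (seznam : List String) (regaly : List (List String)) : List (String × Int × String) :=
  (seznam.foldl (fun (st : List (String × Int × String) × Int) polozka =>
    match (PySem.List.pyRange st.2 (regaly.length : Int) 1).find?
        (fun cislo_regalu => ((PySem.List.pyGet? regaly cislo_regalu).getD []).contains polozka) with
    | some cislo_regalu =>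
        (st.1 ++ [(polozka, cislo_regalu + 1,
            najdi_produkt polozka ((PySem.List.pyGet? regaly cislo_regalu).getD []))],
         cislo_regalu + 1)
    | none => (st.1 ++ [(polozka, -1, "nenalezeno")], st.2)) ([], 0)).1

-- ===== PORT B =====
-- item -> increasing list of the shelf indices containing it, built in one pass over the shelves
def sestav_index (regaly : List (List String)) : PySem.Dict String (List Int) :=
  (PySem.List.enumerate regaly).foldl (fun index p =>
    p.2.foldl (fun index nazev =>
      let d := index.setdefault nazev []
      let sloty := d.getD nazev []
      if sloty.getLast? = some p.1 then d else d.insert nazev (sloty ++ [p.1])) index)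
    PySem.Dict.empty

-- binary search: first shelf index ≥ lo in the increasing list sloty
def prvni_od_go (sloty : List Int) (lo : Int) (a b : Int) : Option Int :=
  if a < b then
    if (PySem.List.pyGet? sloty (PySem.Int.floordiv (a + b) 2)).getD 0 < lo then
      prvni_od_go sloty lo (PySem.Int.floordiv (a + b) 2 + 1) b
    else
      prvni_od_go sloty lo a (PySem.Int.floordiv (a + b) 2)
  else
    if a < (sloty.length : Int) then some ((PySem.List.pyGet? sloty a).getD 0) else none
termination_by (b - a).toNat
decreasing_by
  · have h1 := (PySem.Int.le_floordiv_iff_mul_le (a := a + b) (b := 2) (q := a) (by omega)).mpr (by omega)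
    omega
  · have h2 := (PySem.Int.floordiv_lt_iff_lt_mul (a := a + b) (b := 2) (q := b) (by omega)).mpr (by omega)
    omega

def prvni_od (sloty : List Int) (lo : Int) : Option Int :=
  prvni_od_go sloty lo 0 (sloty.length : Int)

def optimalizuj_seznam_alt (seznam : List String) (regaly : List (List String)) : List (String × Int × String) :=
  let index := sestav_index regaly
  (seznam.foldl (fun (st : List (String × Int × String) × Int) polozka =>
    match prvni_od (index.getD polozka []) st.2 with
    | some i =>
        (st.1 ++ [(polozka, i + 1,
            najdi_produkt polozka ((PySem.List.pyGet? regaly i).getD []))],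
         i + 1)
    | none => (st.1 ++ [(polozka, -1, "nenalezeno")], st.2)) ([], 0)).1

-- ===== PRECONDITION & SPEC =====
def Spec_optimalizuj_seznam (seznam : List String) (regaly : List (List String)) (out : List (String × Int × String)) : Prop := out = optimalizuj_seznam_alt seznam regaly
instance (seznam : List String) (regaly : List (List String)) (out : List (String × Int × String)) : Decidable (Spec_optimalizuj_seznam seznam regaly out) := by unfold Spec_optimalizuj_seznam; infer_instance

-- ===== CLAIM (what is proved, stated in full; the proofs are below) =====
def Claim_equal_optimalizuj_seznam : Prop := ∀ (seznam : List String) (regaly : List (List String)), Dom_optimalizuj_seznam seznam regaly → Spec_optimalizuj_seznam seznam regaly (optimalizuj_seznam seznam regaly)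

-- ===== LEMMAS AND PROOFS =====

-- reference linear scan: first element ≥ lo (what the binary search computes on a sorted list)
def pvLin : List Int → Int → Option Int
  | [], _ => none
  | i :: rest, lo => if i ≥ lo then some i else pvLin rest lo

-- reference shape of the index entry for one key: shelves rs numbered from i
def pvIdxs (rs : List (List String)) (p : String) (i : Int) : List Int :=
  match rs with
  | [] => []
  | r :: rs' => (if r.contains p then [i] else []) ++ pvIdxs rs' p (i + 1)

-- reference linear scan (A's inner loop, shifted to the suffix of the shelves)
def pvScan (rs : List (List String)) (p : String) (i : Int) : Option Int :=
  match rs with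
  | [] => none
  | r :: rs' => if r.contains p then some i else pvScan rs' p (i + 1)

-- one shelf of the index build appends i exactly to the keys on the shelf whose list does not already end in i
theorem pvInner_getD (r : List String) (i : Int) (key : String) :
    ∀ d : PySem.Dict String (List Int),
    (r.foldl (fun index nazev =>
      let d := index.setdefault nazev []
      let sloty := d.getD nazev []
      if sloty.getLast? = some i then d else d.insert nazev (sloty ++ [i])) d).getD key []
    = (d.getD key []) ++
        (if r.contains key ∧ (d.getD key []).getLast? ≠ some i then [i] else []) := by
  induction r with
  | nil => intro d; simp
  | cons nazev r' ih =>
    intro d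
    simp only [List.foldl_cons]
    by_cases hk : nazev = key
    · subst hk
      by_cases hl : ((d.setdefault nazev []).getD nazev []).getLast? = some i
      · rw [if_pos hl, ih]
        rw [PySem.Dict.getD_setdefault_self] at hl ⊢
        simp [hl]
      · rw [if_neg hl, ih]
        rw [PySem.Dict.getD_setdefault_self] at hl ⊢
        rw [PySem.Dict.getD_insert]
        simp [hl]
    · have h1 : ∀ v, ((d.setdefault nazev []).insert nazev v).getD key [] = d.getD key [] := by
        intro v
        rw [PySem.Dict.getD_insert, if_neg (Ne.symm hk)]
        rw [PySem.Dict.getD_eq_get?_getD, PySem.Dict.get?_setdefault_of_ne _ _ (Ne.symm hk),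
            ← PySem.Dict.getD_eq_get?_getD]
      have h2 : (d.setdefault nazev []).getD key [] = d.getD key [] := by
        rw [PySem.Dict.getD_eq_get?_getD, PySem.Dict.get?_setdefault_of_ne _ _ (Ne.symm hk),
            ← PySem.Dict.getD_eq_get?_getD]
      by_cases hl : ((d.setdefault nazev []).getD nazev []).getLast? = some i
      · rw [if_pos hl, ih, h2]
        have : (nazev :: r').contains key = r'.contains key := by simp [Ne.symm hk]
        rw [this]
      · rw [if_neg hl, ih, h1]
        have : (nazev :: r').contains key = r'.contains key := by simp [Ne.symm hk]
        rw [this]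

-- the whole index build, one key at a time
theorem pvOuter_getD (regs : List (List String)) (key : String) :
    ∀ (s : Int) (d : PySem.Dict String (List Int)),
    (∀ x ∈ d.getD key [], x < s) →
    ((PySem.List.enumerate regs s).foldl (fun index p =>
      p.2.foldl (fun index nazev =>
        let d := index.setdefault nazev []
        let sloty := d.getD nazev []
        if sloty.getLast? = some p.1 then d else d.insert nazev (sloty ++ [p.1])) index) d).getD key []
    = d.getD key [] ++ pvIdxs regs key s := by
  induction regs with
  | nil => intro s d _; simp [PySem.List.enumerate_nil, pvIdxs]
  | cons r regs' ih =>
    intro s d hd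
    rw [PySem.List.enumerate_cons]
    simp only [List.foldl_cons]
    have hlast : (d.getD key []).getLast? ≠ some s := by
      intro h
      exact absurd (hd s (List.mem_of_getLast? h)) (lt_irrefl s)
    have hstep := pvInner_getD r s key d
    have hcond : (if r.contains key ∧ (d.getD key []).getLast? ≠ some s then [s] else [])
        = (if r.contains key then [s] else []) := by
      by_cases hc : r.contains key <;> simp [hlast]
    rw [hcond] at hstep
    rw [ih (s + 1) _ ?_, hstep, pvIdxs, List.append_assoc]
    intro x hx
    rw [hstep] at hx
    rcases List.mem_append.mp hx with h | h
    · exact lt_trans (hd x h) (by omega)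
    · by_cases hc : r.contains key
      · rw [if_pos hc] at h; simp at h; omega
      · rw [if_neg hc] at h; simp at h

theorem pvIndex_getD (regaly : List (List String)) (key : String) :
    (sestav_index regaly).getD key [] = pvIdxs regaly key 0 := by
  have := pvOuter_getD regaly key 0 PySem.Dict.empty (by simp [PySem.Dict.getD_empty])
  simpa [sestav_index, PySem.Dict.getD_empty] using this

-- scanning an index list from i for the first entry ≥ lo = linear scan of the shelf suffix
theorem pvPrvni_ge (rs : List (List String)) (p : String) :
    ∀ (i lo : Int), lo ≤ i → pvLin (pvIdxs rs p i) lo = pvScan rs p i := by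
  induction rs with
  | nil => intro i lo _; simp [pvIdxs, pvScan, pvLin]
  | cons r rs' ih =>
    intro i lo h
    by_cases hc : r.contains p
    · have hm : p ∈ r := by simpa using hc
      simp [pvIdxs, pvScan, hm, pvLin, h]
    · have hm : p ∉ r := by simpa using hc
      simp only [pvIdxs, pvScan, hc]
      exact ih (i + 1) lo (by omega)

theorem pvPrvni_drop (rs : List (List String)) (p : String) :
    ∀ (i lo : Int), i ≤ lo →
    pvLin (pvIdxs rs p i) lo = pvScan (rs.drop (lo - i).toNat) p lo := by
  induction rs with
  | nil => intro i lo _; simp [pvIdxs, pvScan, pvLin]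
  | cons r rs' ih =>
    intro i lo h
    rcases eq_or_lt_of_le h with heq | hlt
    · subst heq
      have : (i - i).toNat = 0 := by omega
      rw [this, List.drop_zero]
      exact pvPrvni_ge (r :: rs') p i i le_rfl
    · have hrec : pvLin (pvIdxs (r :: rs') p i) lo = pvLin (pvIdxs rs' p (i + 1)) lo := by
        by_cases hc : r.contains p
        · have hm : p ∈ r := by simpa using hc
          simp [pvIdxs, hm, pvLin, not_le.mpr hlt]
        · have hm : p ∉ r := by simpa using hc
          simp [pvIdxs, hm]
      rw [hrec, ih (i + 1) lo (by omega)]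
      have : (lo - i).toNat = (lo - (i + 1)).toNat + 1 := by omega
      rw [this, List.drop_succ_cons]

-- index entries are strictly increasing
theorem pvIdxs_lb (rs : List (List String)) (p : String) :
    ∀ (i : Int), ∀ x ∈ pvIdxs rs p i, i ≤ x := by
  induction rs with
  | nil => intro i x hx; simp [pvIdxs] at hx
  | cons r rs' ih =>
    intro i x hx
    simp only [pvIdxs, List.mem_append] at hx
    rcases hx with h | h
    · by_cases hc : r.contains p
      · have hm : p ∈ r := by simpa using hc
        simp [hm] at h; omega
      · have hm : p ∉ r := by simpa using hc
        simp [hm] at h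
    · have := ih (i + 1) x h; omega

theorem pvIdxs_sorted (rs : List (List String)) (p : String) :
    ∀ (i : Int), (pvIdxs rs p i).Pairwise (· < ·) := by
  induction rs with
  | nil => intro i; simp [pvIdxs]
  | cons r rs' ih =>
    intro i
    by_cases hc : r.contains p
    · simp only [pvIdxs, hc, if_true, List.singleton_append]
      exact List.pairwise_cons.mpr ⟨fun x hx => by have := pvIdxs_lb rs' p (i + 1) x hx; omega, ih (i + 1)⟩
    · simpa only [pvIdxs, hc, if_false, List.nil_append] using ih (i + 1)

-- the linear scan's result, located at the first index whose element is ≥ lo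
theorem pvLin_at (lo : Int) :
    ∀ (l : List Int) (a : Nat),
    (∀ (j : Nat) (hj : j < l.length), j < a → l[j] < lo) →
    (∀ (j : Nat) (hj : j < l.length), a ≤ j → lo ≤ l[j]) →
    pvLin l lo = if h : a < l.length then some l[a] else none := by
  intro l
  induction l with
  | nil => intro a _ _; simp [pvLin]
  | cons x l' ih =>
    intro a ha hb
    cases a with
    | zero =>
      have hx : lo ≤ x := hb 0 (by simp) (by omega)
      simp [pvLin, hx]
    | succ k =>
      have hx : x < lo := ha 0 (by simp) (by omega)
      have : pvLin (x :: l') lo = pvLin l' lo := by simp [pvLin, not_le.mpr hx]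
      rw [this, ih k (fun j hj hjk => ha (j + 1) (by simpa using hj) (by omega))
            (fun j hj hjk => hb (j + 1) (by simpa using hj) (by omega))]
      simp

-- the binary search agrees with the linear scan on a strictly increasing list
theorem pvGo_base (l : List Int) (lo : Int) (a : Nat) :
    (∀ (j : Nat) (hj : j < l.length), j < a → l[j] < lo) →
    (∀ (j : Nat) (hj : j < l.length), a ≤ j → lo ≤ l[j]) →
    prvni_od_go l lo (a : Int) (a : Int) = pvLin l lo := by
  intro ha hb
  rw [prvni_od_go, if_neg (by omega)]
  rw [pvLin_at lo l a ha hb]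
  by_cases hlen : a < l.length
  · rw [if_pos (by exact_mod_cast hlen), dif_pos hlen, PySem.List.pyGet?_natCast]
    simp [List.getElem?_eq_getElem hlen]
  · rw [if_neg (by exact_mod_cast hlen), dif_neg hlen]

theorem pvGo_eq (l : List Int) (lo : Int) (hs : l.Pairwise (· < ·)) :
    ∀ (k : Nat) (a b : Int), (b - a).toNat ≤ k → 0 ≤ a → a ≤ b → b ≤ (l.length : Int) →
    (∀ (j : Nat) (hj : j < l.length), (j : Int) < a → l[j] < lo) →
    (∀ (j : Nat) (hj : j < l.length), b ≤ (j : Int) → lo ≤ l[j]) →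
    prvni_od_go l lo a b = pvLin l lo := by
  have hpw := List.pairwise_iff_getElem.mp hs
  intro k
  induction k with
  | zero =>
    intro a b hk h0 hab hbl ha hb
    obtain ⟨an, rfl⟩ : ∃ an : Nat, a = (an : Int) := ⟨a.toNat, by omega⟩
    obtain rfl : b = (an : Int) := by omega
    exact pvGo_base l lo an (fun j hj hjk => ha j hj (by omega))
      (fun j hj hjk => hb j hj (by omega))
  | succ k ih =>
    intro a b hk h0 hab hbl ha hb
    by_cases hlt : a < b
    · rw [prvni_od_go, if_pos hlt]
      have h1 := (PySem.Int.le_floordiv_iff_mul_le (a := a + b) (b := 2) (q := a) (by omega)).mpr (by omega)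
      have h2 := (PySem.Int.floordiv_lt_iff_lt_mul (a := a + b) (b := 2) (q := b) (by omega)).mpr (by omega)
      obtain ⟨mn, hmn⟩ : ∃ mn : Nat, PySem.Int.floordiv (a + b) 2 = (mn : Int) :=
        ⟨(PySem.Int.floordiv (a + b) 2).toNat, by omega⟩
      have hb1 : a ≤ (mn : Int) := hmn ▸ h1
      have hb2 : (mn : Int) < b := hmn ▸ h2
      have hmlen : mn < l.length := by omega
      have hgm : (PySem.List.pyGet? l (PySem.Int.floordiv (a + b) 2)).getD 0 = l[mn] := by
        rw [hmn, PySem.List.pyGet?_natCast]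
        simp [List.getElem?_eq_getElem hmlen]
      rw [hgm]
      by_cases hc : l[mn] < lo
      · rw [if_pos hc, hmn]
        refine ih ((mn : Int) + 1) b (by omega) (by omega) (by omega) hbl ?_ hb
        intro j hj hja
        rcases lt_or_eq_of_le (show j ≤ mn by omega) with h | h
        · exact lt_trans (hpw j mn hj hmlen h) hc
        · subst h; exact hc
      · rw [if_neg hc, hmn]
        refine ih a (mn : Int) (by omega) (by omega) (by omega) (by omega) ha ?_
        intro j hj hjb
        rcases lt_or_eq_of_le (show mn ≤ j by omega) with h | h
        · exact le_of_lt (lt_of_le_of_lt (not_lt.mp hc) (hpw mn j hmlen hj h))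
        · subst h; exact not_lt.mp hc
    · obtain ⟨an, rfl⟩ : ∃ an : Nat, a = (an : Int) := ⟨a.toNat, by omega⟩
      obtain rfl : b = (an : Int) := by omega
      exact pvGo_base l lo an (fun j hj hjk => ha j hj (by omega))
        (fun j hj hjk => hb j hj (by omega))

theorem pvPrvni_eq_lin (l : List Int) (lo : Int) (hs : l.Pairwise (· < ·)) :
    prvni_od l lo = pvLin l lo := by
  exact pvGo_eq l lo hs l.length 0 (l.length : Int) (by omega) (by omega) (by omega)
    (by omega) (fun j hj h => by omega) (fun j hj h => by omega)

-- A's range search = linear scan of the shelf suffix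
theorem pvFind_eq_scan_aux (regaly : List (List String)) (p : String) :
    ∀ (k n : Nat), regaly.length - n = k → n ≤ regaly.length →
    (PySem.List.pyRange (n : Int) (regaly.length : Int) 1).find?
        (fun c => ((PySem.List.pyGet? regaly c).getD []).contains p)
    = pvScan (regaly.drop n) p (n : Int) := by
  intro k
  induction k with
  | zero =>
    intro n hk hn
    have hn' : n = regaly.length := by omega
    subst hn'
    rw [PySem.List.pyRange_one_eq_nil (le_refl _), List.drop_length]
    simp [pvScan]
  | succ k ih =>
    intro n hk hn
    have hlt : n < regaly.length := by omega
    rw [PySem.List.pyRange_one_cons (by exact_mod_cast hlt)]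
    have hget : (PySem.List.pyGet? regaly (n : Int)).getD [] = regaly[n] := by
      rw [PySem.List.pyGet?_natCast]
      simp [List.getElem?_eq_getElem hlt]
    have hdrop : regaly.drop n = regaly[n] :: regaly.drop (n + 1) :=
      List.drop_eq_getElem_cons hlt
    have hcast : (n : Int) + 1 = ((n + 1 : Nat) : Int) := by push_cast; ring
    by_cases hc : regaly[n].contains p
    · have hm : p ∈ regaly[n] := by simpa using hc
      rw [List.find?_cons_of_pos (by rw [hget]; exact hc), hdrop]
      simp [pvScan, hm]
    · have hm : p ∉ regaly[n] := by simpa using hc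
      rw [List.find?_cons_of_neg (by rw [hget]; exact hc), hdrop]
      have hs : pvScan (regaly[n] :: regaly.drop (n + 1)) p (n : Int)
          = pvScan (regaly.drop (n + 1)) p ((n : Int) + 1) := by
        simp [pvScan, hm]
      rw [hs, hcast, ih (n + 1) (by omega) (by omega)]

theorem pvScan_ge (rs : List (List String)) (p : String) :
    ∀ (i c : Int), pvScan rs p i = some c → i ≤ c ∧ c < i + rs.length := by
  induction rs with
  | nil => intro i c h; simp [pvScan] at h
  | cons r rs' ih =>
    intro i c h
    simp only [pvScan] at h
    by_cases hc : r.contains p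
    · rw [if_pos hc] at h
      injection h with h
      simp only [List.length_cons]
      omega
    · rw [if_neg hc] at h
      have := ih (i + 1) c h
      simp only [List.length_cons]
      omega

-- the two per-item steps agree once the pointer is a natural number within range
theorem pvFold_eq (regaly : List (List String)) :
    ∀ (seznam : List String) (acc : List (String × Int × String)) (n : Nat),
    n ≤ regaly.length →
    (seznam.foldl (fun (st : List (String × Int × String) × Int) polozka =>
      match (PySem.List.pyRange st.2 (regaly.length : Int) 1).find?
          (fun cislo_regalu => ((PySem.List.pyGet? regaly cislo_regalu).getD []).contains polozka) with
      | some cislo_regalu =>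
          (st.1 ++ [(polozka, cislo_regalu + 1,
              najdi_produkt polozka ((PySem.List.pyGet? regaly cislo_regalu).getD []))],
           cislo_regalu + 1)
      | none => (st.1 ++ [(polozka, -1, "nenalezeno")], st.2)) (acc, (n : Int))).1
    = (seznam.foldl (fun (st : List (String × Int × String) × Int) polozka =>
      match prvni_od ((sestav_index regaly).getD polozka []) st.2 with
      | some i =>
          (st.1 ++ [(polozka, i + 1,
              najdi_produkt polozka ((PySem.List.pyGet? regaly i).getD []))],
           i + 1)
      | none => (st.1 ++ [(polozka, -1, "nenalezeno")], st.2)) (acc, (n : Int))).1 := by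
  intro seznam
  induction seznam with
  | nil => intro acc n _; rfl
  | cons polozka rest ih =>
    intro acc n hn
    simp only [List.foldl_cons]
    have hB : prvni_od ((sestav_index regaly).getD polozka []) ((n : Int))
        = pvScan (regaly.drop n) polozka (n : Int) := by
      rw [pvIndex_getD, pvPrvni_eq_lin _ _ (pvIdxs_sorted regaly polozka 0)]
      have := pvPrvni_drop regaly polozka 0 (n : Int) (by omega)
      simpa using this
    have hA := pvFind_eq_scan_aux regaly polozka (regaly.length - n) n rfl hn
    rw [hA, hB]
    cases hscan : pvScan (regaly.drop n) polozka (n : Int) with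
    | none => exact ih _ n hn
    | some c =>
      have hc := pvScan_ge (regaly.drop n) polozka (n : Int) c hscan
      rw [List.length_drop] at hc
      have hc1 : c + 1 = ((c.toNat + 1 : Nat) : Int) := by omega
      simp only
      rw [hc1]
      exact ih _ (c.toNat + 1) (by omega)

-- ===== VERDICT (by name: the statement is the Claim_ definition above) =====
theorem optimalizuj_seznam_spec : Claim_equal_optimalizuj_seznam := by
  intro seznam regaly _
  unfold Spec_optimalizuj_seznam optimalizuj_seznam optimalizuj_seznam_alt
  exact pvFold_eq regaly seznam [] 0 (by omega)
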